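-- pv_equiv track=rewrite | github.com/hey-watchme/app-android-zero-touch | backend/services/wiki_ingestor.py | _derive_page_key
-- ===== SOURCE A (Python) =====
-- from typing import Any, Dict, List, Optional
--
-- UNASSIGNED_PROJECT_KEY = "unassigned"
--
-- def _normalize_text(value: Any) -> Optional[str]:
--     if value is None:
--         return None
--     text = str(value).strip()
--     return text or None
--
-- def _normalize_machine_key(value: Any) -> Optional[str]:
--     text = _normalize_text(value)
--     if not text:
--         return None
--
--     chars: List[str] = []
--     previous_sep = False
--     for raw_char in text.casefold():
--         if raw_char.isalnum():
--             chars.append(raw_char)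
--             previous_sep = False
--             continue
--         if raw_char in {" ", "-", "_", "/", "&", ":"}:
--             if not previous_sep:
--                 chars.append("-")
--                 previous_sep = True
--
--     key = "".join(chars).strip("-")
--     return key or None
--
-- def _derive_page_key(project_key: Optional[str], category: Optional[str], title: str) -> Optional[str]:
--     parts = [
--         _normalize_machine_key(project_key) if project_key and project_key != UNASSIGNED_PROJECT_KEY else None,
--         _normalize_machine_key(category),
--         _normalize_machine_key(title),
--     ]
--     joined = "-".join([part for part in parts if part])
--     return joined or None
-- ===== SOURCE B (Python) =====
-- from typing import Optional
--
-- UNASSIGNED_PROJECT_KEY = "unassigned"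
--
-- def _derive_page_key(project_key: Optional[str], category: Optional[str], title: str) -> Optional[str]:
--     # Because separator runs collapse and junk is dropped, the three parts can be
--     # joined FIRST (with a space, itself a separator) and normalized in one pass.
--     if not project_key or project_key == UNASSIGNED_PROJECT_KEY:
--         project_key = ""
--     combined = " ".join((project_key, category or "", title))
--     mapped = "".join(
--         c if c.isalnum() else (" " if c in " -_/&:" else "")
--         for c in combined.casefold()
--     )
--     return "-".join(mapped.split()) or None
-- ===== Notes on version B (the rewrite author's own statement) =====
-- stated objective: simpler
-- what changed: Instead of normalizing each of the three parts separately (stateful scan with a previous_sep flag, '-' emission, strip('-'), Optional plumbing and a filtered join), B joins the raw parts first with a space (itself a separator, and separator runs collapse) and normalizes the combined string once via a stateless map (keep alnum, separator->space, drop rest) followed by str.split() and '-'.join.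
import Mathlib
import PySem

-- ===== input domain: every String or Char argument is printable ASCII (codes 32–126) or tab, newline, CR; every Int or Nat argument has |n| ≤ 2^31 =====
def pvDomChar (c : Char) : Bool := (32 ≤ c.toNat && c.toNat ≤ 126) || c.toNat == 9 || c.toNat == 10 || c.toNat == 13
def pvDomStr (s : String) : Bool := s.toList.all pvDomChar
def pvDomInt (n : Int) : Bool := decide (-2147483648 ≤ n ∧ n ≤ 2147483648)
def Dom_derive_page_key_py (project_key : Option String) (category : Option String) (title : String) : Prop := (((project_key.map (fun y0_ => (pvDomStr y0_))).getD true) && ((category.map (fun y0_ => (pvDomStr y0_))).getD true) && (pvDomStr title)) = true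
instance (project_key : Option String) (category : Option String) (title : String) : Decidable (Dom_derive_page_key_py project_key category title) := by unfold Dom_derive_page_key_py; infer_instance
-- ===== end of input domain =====

-- B joins the three parts FIRST (with a space, itself a separator, since separator runs collapse)
-- and normalizes the combined string once — no per-part normalization or Optional plumbing (objective: simpler).

-- ===== PORT A =====
-- _normalize_text (value is None or a str at every call site; str(value) is the identity on str)
def normalize_text_A (v : Option String) : Option (List Char) :=
  match v with
  | none => none
  | some s =>
    let text := PySem.Chars.strip s.toList
    if text.isEmpty then none else some text

-- raw_char in {" ", "-", "_", "/", "&", ":"}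
def pvIsSepA (c : Char) : Bool :=
  c == ' ' || c == '-' || c == '_' || c == '/' || c == '&' || c == ':'

-- the body of A's for-loop over (chars, previous_sep)
def machineStepA (st : List Char × Bool) (c : Char) : List Char × Bool :=
  if PySem.Chars.isalnum c then (st.1 ++ [c], false)
  else if pvIsSepA c then (if st.2 then st else (st.1 ++ ['-'], true))
  else st

-- _normalize_machine_key; text.casefold() = Chars.lower on the ASCII domain
def normalize_machine_key_A (v : Option String) : Option (List Char) :=
  match normalize_text_A v with
  | none => none
  | some text =>
    let st := (PySem.Chars.lower text).foldl machineStepA ([], false)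
    let key := PySem.Chars.stripChars st.1 ['-']
    if key.isEmpty then none else some key

def derive_page_key_py (project_key : Option String) (category : Option String) (title : String) : Option String :=
  let p1 : Option (List Char) :=
    match project_key with
    | none => none
    | some s => if !s.toList.isEmpty && s != "unassigned" then normalize_machine_key_A (some s) else none
  let parts : List (Option (List Char)) :=
    [p1, normalize_machine_key_A category, normalize_machine_key_A (some title)]
  let joined := PySem.Chars.join ['-']
    (parts.filterMap (fun p => match p with
      | some q => if q.isEmpty then none else some q
      | none => none))
  if joined.isEmpty then none else some (String.ofList joined)

-- ===== PORT B =====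
-- c if c.isalnum() else (' ' if c in " -_/&:" else '')   ('in' on str = substring test)
def pvMapB (c : Char) : List Char :=
  if PySem.Chars.isalnum c then [c]
  else if PySem.Chars.isIn [c] " -_/&:".toList then [' ']
  else []

def derive_page_key_py_alt (project_key : Option String) (category : Option String) (title : String) : Option String :=
  -- if not project_key or project_key == UNASSIGNED_PROJECT_KEY: project_key = ""
  let pk : String :=
    match project_key with
    | none => ""
    | some s => if s.toList.isEmpty || s == "unassigned" then "" else s
  -- combined = " ".join((project_key, category or "", title))
  let combined := PySem.Chars.join [' '] [pk.toList, (category.getD "").toList, title.toList]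
  -- mapped = "".join(c if c.isalnum() else " " if c in " -_/&:" else "" for c in combined.casefold())
  let mapped := (PySem.Chars.lower combined).flatMap pvMapB
  -- "-".join(mapped.split()) or None
  let key := PySem.Chars.join ['-'] (PySem.Chars.split₀ mapped)
  if key.isEmpty then none else some (String.ofList key)

-- ===== PRECONDITION & SPEC =====
def Spec_derive_page_key_py (project_key : Option String) (category : Option String) (title : String) (out : Option String) : Prop := out = derive_page_key_py_alt project_key category title
instance (project_key : Option String) (category : Option String) (title : String) (out : Option String) : Decidable (Spec_derive_page_key_py project_key category title out) := by unfold Spec_derive_page_key_py; infer_instance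

-- ===== CLAIM (what is proved, stated in full; the proofs are below) =====
def Claim_equal_derive_page_key_py : Prop := ∀ (project_key : Option String) (category : Option String) (title : String), Dom_derive_page_key_py project_key category title → Spec_derive_page_key_py project_key category title (derive_page_key_py project_key category title)

-- ===== LEMMAS AND PROOFS =====

-- proof-side helpers: pure recursion equivalent of A's foldl, strip('-') pieces, B's pipeline on chars
def A1 : List Char → Bool → List Char
  | [], _ => []
  | c :: r, p =>
    if PySem.Chars.isalnum c then c :: A1 r false
    else if pvIsSepA c then (if p then A1 r true else '-' :: A1 r true)
    else A1 r p

def pdD : Char → Bool := fun c => ['-'].contains c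

def rD (x : List Char) : List Char := (List.dropWhile pdD x.reverse).reverse

def Fm (cs : List Char) : List Char := cs.flatMap pvMapB

def gg (m cur : List Char) : List (List Char) := PySem.Chars.split₀.go m cur []

-- B's whole normalization pipeline on a raw char list
def NB (l : List Char) : List Char :=
  PySem.Chars.join ['-'] (PySem.Chars.split₀ (Fm (PySem.Chars.lower l)))

-- character classification facts
theorem alnum_range (c : Char) (h : PySem.Chars.isalnum c = true) :
    48 ≤ c.toNat ∧ c.toNat ≤ 122 := by
  simp only [PySem.Chars.isalnum, PySem.Chars.isalpha, PySem.Chars.isdigit, PySem.Chars.isupper,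
    PySem.Chars.islower, Bool.or_eq_true, Bool.and_eq_true, decide_eq_true_eq] at h
  have e : ∀ a b : Char, a ≤ b ↔ a.toNat ≤ b.toNat := fun a b => ge_iff_le
  rw [e, e, e, e, e, e] at h
  have h0 : '0'.toNat = 48 := rfl
  have h9 : '9'.toNat = 57 := rfl
  have hA : 'A'.toNat = 65 := rfl
  have hZ : 'Z'.toNat = 90 := rfl
  have ha : 'a'.toNat = 97 := rfl
  have hz : 'z'.toNat = 122 := rfl
  omega

theorem alnum_not_space (c : Char) (h : PySem.Chars.isalnum c = true) :
    PySem.Chars.isspace c = false := by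
  obtain ⟨hlo, hhi⟩ := alnum_range c h
  rw [PySem.Chars.isspace, Bool.eq_false_iff]
  intro hs
  simp only [Bool.or_eq_true, Bool.and_eq_true, decide_eq_true_eq] at hs
  omega

theorem alnum_not_pd (c : Char) (h : PySem.Chars.isalnum c = true) : pdD c = false := by
  obtain ⟨hlo, _⟩ := alnum_range c h
  rw [pdD, Bool.eq_false_iff]
  intro hs
  have hc : c = '-' := by simpa using hs
  rw [hc] at hlo
  exact absurd hlo (by decide)

theorem sep_eq (c : Char) : PySem.Chars.isIn [c] [' ', '-', '_', '/', '&', ':'] = pvIsSepA c := by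
  rw [Bool.eq_iff_iff, PySem.Chars.isIn_iff_infix, List.singleton_infix_iff]
  simp only [pvIsSepA, Bool.or_eq_true, beq_iff_eq]
  constructor
  · intro hm
    fin_cases hm <;> tauto
  · intro hm
    rcases hm with ((((hm | hm) | hm) | hm) | hm) | hm <;> subst hm <;> decide

theorem sep_space (c : Char) (hS : pvIsSepA c = true) (hs : PySem.Chars.isspace c = true) :
    c = ' ' := by
  simp only [pvIsSepA, Bool.or_eq_true, beq_iff_eq] at hS
  rcases hS with ((((h | h) | h) | h) | h) | h <;> subst h <;> first | rfl | exact absurd hs (by decide)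

-- a whitespace char other than ' ' contributes nothing to B's mapped string
theorem ws_map_empty (c : Char) (hs : PySem.Chars.isspace c = true) (hne : c ≠ ' ') :
    pvMapB c = [] := by
  rw [pvMapB]
  have hA : PySem.Chars.isalnum c = false := by
    cases h : PySem.Chars.isalnum c
    · rfl
    · exact absurd hs (by rw [alnum_not_space c h]; decide)
  rw [hA, if_neg (by simp)]
  have hsep : PySem.Chars.isIn [c] " -_/&:".toList = pvIsSepA c := sep_eq c
  cases h : pvIsSepA c
  · rw [hsep, h]; simp
  · exact absurd (sep_space c h hs) hne

theorem map_space : pvMapB ' ' = [' '] := by decide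

-- A's foldl peels off into A1
theorem foldA_acc (cs : List Char) : ∀ (chars : List Char) (p : Bool),
    (List.foldl machineStepA (chars, p) cs).1 = chars ++ A1 cs p := by
  induction cs with
  | nil => intro chars p; simp [A1]
  | cons c r ih =>
    intro chars p
    by_cases hA : PySem.Chars.isalnum c = true
    · simp [machineStepA, hA, A1, ih]
    · by_cases hS : pvIsSepA c = true
      · cases p with
        | false => simp [machineStepA, hA, hS, A1, ih]
        | true => simp [machineStepA, hA, hS, A1, ih]
      · simp [machineStepA, hA, hS, A1, ih]

-- split₀.go: the accumulator only prepends
theorem go_acc (m : List Char) : ∀ (cur : List Char) (acc : List (List Char)),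
    PySem.Chars.split₀.go m cur acc = acc.reverse ++ PySem.Chars.split₀.go m cur [] := by
  induction m with
  | nil =>
    intro cur acc
    rw [PySem.Chars.split₀.go, PySem.Chars.split₀.go]
    by_cases h : cur.isEmpty = true <;> simp [h]
  | cons c rest ih =>
    intro cur acc
    rw [PySem.Chars.split₀.go]
    conv_rhs => rw [PySem.Chars.split₀.go]
    by_cases hs : PySem.Chars.isspace c = true
    · by_cases he : cur.isEmpty = true
      · simp only [hs, he, if_true]
        exact ih [] acc
      · simp only [hs, he, if_true, Bool.false_eq_true, if_false]
        rw [ih [] (cur.reverse :: acc), ih [] [cur.reverse]]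
        simp
    · simp only [hs, Bool.false_eq_true, if_false]
      exact ih (c :: cur) acc

theorem go_ne_nil (m : List Char) : ∀ (cur : List Char), [] ∉ PySem.Chars.split₀.go m cur [] := by
  induction m with
  | nil =>
    intro cur
    rw [PySem.Chars.split₀.go]
    by_cases h : cur.isEmpty = true
    · simp [h]
    · simp only [h, Bool.false_eq_true, if_false]
      simp only [List.reverse_cons, List.reverse_nil, List.nil_append, List.mem_singleton]
      intro hc
      apply h
      have hcur : cur = [] := by simpa using hc.symm
      simp [hcur]
  | cons c rest ih =>
    intro cur
    rw [PySem.Chars.split₀.go]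
    by_cases hs : PySem.Chars.isspace c = true
    · by_cases he : cur.isEmpty = true
      · simp only [hs, he, if_true]
        exact ih []
      · simp only [hs, he, if_true, Bool.false_eq_true, if_false]
        rw [go_acc]
        intro hmem
        rcases List.mem_append.mp hmem with hm | hm
        · simp only [List.reverse_cons, List.reverse_nil, List.nil_append, List.mem_singleton] at hm
          apply he
          have hcur : cur = [] := by simpa using hm.symm
          simp [hcur]
        · exact ih [] hm
    · simp only [hs, Bool.false_eq_true, if_false]
      exact ih (c :: cur)

theorem join_cons (sep : List Char) (x : List Char) (L : List (List Char)) :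
    PySem.Chars.join sep (x :: L) = x ++ (if L = [] then [] else sep ++ PySem.Chars.join sep L) := by
  cases L with
  | nil => simp [PySem.Chars.join, List.intercalate]
  | cons y t => simp [PySem.Chars.join, List.intercalate, List.intersperse]

theorem join_ne_nil (L : List (List Char)) (hL : [] ∉ L) (hne : L ≠ []) :
    PySem.Chars.join ['-'] L ≠ [] := by
  cases L with
  | nil => exact absurd rfl hne
  | cons x t =>
    rw [join_cons]
    have hx : x ≠ [] := fun h => hL (h ▸ List.mem_cons_self)
    intro h
    rcases List.append_eq_nil_iff.mp h with ⟨h1, _⟩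
    exact hx h1

theorem join_append (L1 L2 : List (List Char)) :
    PySem.Chars.join ['-'] (L1 ++ L2) =
      if L1 = [] then PySem.Chars.join ['-'] L2
      else if L2 = [] then PySem.Chars.join ['-'] L1
      else PySem.Chars.join ['-'] L1 ++ '-' :: PySem.Chars.join ['-'] L2 := by
  induction L1 with
  | nil => simp
  | cons x t ih =>
    by_cases h2 : L2 = []
    · simp [h2]
    · rw [List.cons_append, join_cons, join_cons, ih]
      have hne : t ++ L2 ≠ [] := by simp [h2]
      by_cases ht : t = []
      · simp [ht, h2]
      · simp only [hne, if_false, ht, h2, if_neg (by simp : ¬(x :: t = []))]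
        simp

theorem rD_cons (c : Char) (x : List Char) (h : pdD c = false) : rD (c :: x) = c :: rD x := by
  rw [rD, rD, List.reverse_cons, List.dropWhile_append]
  by_cases he : (List.dropWhile pdD x.reverse).isEmpty = true
  · simp [List.dropWhile, h, List.isEmpty_iff.mp he]
  · simp [he]

theorem rD_dash (x : List Char) : rD ('-' :: x) = if rD x = [] then [] else '-' :: rD x := by
  rw [rD, rD, List.reverse_cons, List.dropWhile_append]
  have hd : List.dropWhile pdD ['-'] = [] := by simp [List.dropWhile, pdD]
  by_cases he : (List.dropWhile pdD x.reverse).isEmpty = true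
  · simp [hd, List.isEmpty_iff.mp he]
  · simp only [he, Bool.false_eq_true, if_false, List.reverse_append]
    rw [if_neg]
    · simp
    · simp only [List.isEmpty_iff] at he
      simp [he]

theorem A1_true_lstrip (cs : List Char) : List.dropWhile pdD (A1 cs true) = A1 cs true := by
  induction cs with
  | nil => simp [A1]
  | cons c r ih =>
    by_cases hA : PySem.Chars.isalnum c = true
    · simp [A1, hA, alnum_not_pd c hA]
    · by_cases hS : pvIsSepA c = true
      · simpa [A1, hA, hS] using ih
      · simpa [A1, hA, hS] using ih

theorem A1_false_lstrip (cs : List Char) : List.dropWhile pdD (A1 cs false) = A1 cs true := by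
  induction cs with
  | nil => simp [A1]
  | cons c r ih =>
    by_cases hA : PySem.Chars.isalnum c = true
    · simp [A1, hA, alnum_not_pd c hA]
    · by_cases hS : pvIsSepA c = true
      · simp only [A1, hA, hS, Bool.false_eq_true, if_false, if_true]
        simp only [List.dropWhile, pdD]
        simp only [show (['-'].contains '-') = true from rfl]
        exact A1_true_lstrip r
      · simpa [A1, hA, hS] using ih

-- the core correspondence between A's scan and B's map/split/join
theorem main_corr (cs : List Char) :
    (rD (A1 cs true) = PySem.Chars.join ['-'] (gg (Fm cs) [])) ∧
    (∀ w : List Char, w ≠ [] →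
      w.reverse ++ rD (A1 cs false) = PySem.Chars.join ['-'] (gg (Fm cs) w)) := by
  induction cs with
  | nil =>
    constructor
    · simp [A1, rD, Fm, gg]
      rw [PySem.Chars.split₀.go]
      simp [PySem.Chars.join, List.intercalate]
    · intro w hw
      simp only [A1, rD, Fm, gg, List.flatMap_nil, List.reverse_nil, List.dropWhile_nil,
        List.append_nil]
      rw [PySem.Chars.split₀.go]
      rw [if_neg (by simp [List.isEmpty_iff, hw])]
      simp [PySem.Chars.join, List.intercalate]
  | cons c r ih =>
    obtain ⟨ihP, ihQ⟩ := ih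
    by_cases hA : PySem.Chars.isalnum c = true
    · have hF : Fm (c :: r) = c :: Fm r := by simp [Fm, pvMapB, hA]
      have hstep : ∀ w, gg (c :: Fm r) w = gg (Fm r) (c :: w) := by
        intro w
        rw [gg, PySem.Chars.split₀.go]
        simp [alnum_not_space c hA, gg]
      constructor
      · rw [A1, if_pos hA, rD_cons c _ (alnum_not_pd c hA), hF, hstep]
        rw [← ihQ [c] (by simp)]
        simp
      · intro w hw
        rw [A1, if_pos hA, rD_cons c _ (alnum_not_pd c hA), hF, hstep]
        rw [← ihQ (c :: w) (by simp)]
        simp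
    · by_cases hS : pvIsSepA c = true
      · have hF : Fm (c :: r) = ' ' :: Fm r := by
          simp [Fm, pvMapB, hA, sep_eq, hS]
        have hsp : PySem.Chars.isspace ' ' = true := by decide
        constructor
        · rw [A1, if_neg (by simp [hA]), if_pos hS, if_pos rfl, hF]
          rw [show gg (' ' :: Fm r) [] = gg (Fm r) [] by
            rw [gg, PySem.Chars.split₀.go, if_pos hsp]; simp [gg]]
          exact ihP
        · intro w hw
          rw [A1, if_neg (by simp [hA]), if_pos hS, if_neg (by simp), hF]
          rw [show gg (' ' :: Fm r) w = PySem.Chars.split₀.go (Fm r) [] [w.reverse] by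
            rw [gg, PySem.Chars.split₀.go, if_pos hsp,
              if_neg (show ¬w.isEmpty = true by simp [List.isEmpty_iff, hw])]]
          rw [go_acc]
          simp only [List.reverse_cons, List.reverse_nil, List.nil_append]
          rw [show PySem.Chars.split₀.go (Fm r) [] [] = gg (Fm r) [] from rfl]
          rw [show ([w.reverse] : List (List Char)) ++ gg (Fm r) [] = w.reverse :: gg (Fm r) [] from rfl]
          rw [join_cons, rD_dash, ihP]
          by_cases hg : gg (Fm r) [] = []
          · simp [hg, PySem.Chars.join, List.intercalate]
          · rw [if_neg hg, if_neg]
            · simp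
            · exact join_ne_nil _ (go_ne_nil (Fm r) []) hg
      · have hF : Fm (c :: r) = Fm r := by simp [Fm, pvMapB, hA, sep_eq, hS]
        constructor
        · rw [A1, if_neg (by simp [hA]), if_neg (by simp [hS]), hF]
          exact ihP
        · intro w hw
          rw [A1, if_neg (by simp [hA]), if_neg (by simp [hS]), hF]
          exact ihQ w hw

-- lowerChar preserves whitespace-ness
theorem not_space_of_range (c : Char) (h1 : 48 ≤ c.toNat) (h2 : c.toNat ≤ 122) :
    PySem.Chars.isspace c = false := by
  rw [PySem.Chars.isspace, Bool.eq_false_iff]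
  intro hs
  simp only [Bool.or_eq_true, Bool.and_eq_true, decide_eq_true_eq] at hs
  omega

theorem isupper_range (c : Char) (h : PySem.Chars.isupper c = true) :
    65 ≤ c.toNat ∧ c.toNat ≤ 90 := by
  simp only [PySem.Chars.isupper, Bool.and_eq_true, decide_eq_true_eq] at h
  have e : ∀ a b : Char, a ≤ b ↔ a.toNat ≤ b.toNat := fun a b => ge_iff_le
  rw [e, e] at h
  have hA : 'A'.toNat = 65 := rfl
  have hZ : 'Z'.toNat = 90 := rfl
  omega

theorem isspace_lowerChar (c : Char) :
    PySem.Chars.isspace (PySem.Chars.lowerChar c) = PySem.Chars.isspace c := by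
  rw [PySem.Chars.lowerChar]
  by_cases h : PySem.Chars.isupper c = true
  · rw [if_pos h]
    obtain ⟨h1, h2⟩ := isupper_range c h
    have hv : (Char.ofNat (c.toNat + 32)).toNat = c.toNat + 32 := by
      have : Nat.isValidChar (c.toNat + 32) := Or.inl (by omega)
      simp [Char.ofNat, this]
    rw [not_space_of_range c (by omega) (by omega),
        not_space_of_range _ (by omega) (by omega)]
  · rw [if_neg h]

-- lower commutes with strip
theorem lower_strip (l : List Char) :
    PySem.Chars.lower (PySem.Chars.strip l) = PySem.Chars.strip (PySem.Chars.lower l) := by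
  have hl : ∀ m : List Char, PySem.Chars.lower m = m.map PySem.Chars.lowerChar := fun m => rfl
  have hs : ∀ m : List Char, PySem.Chars.strip m =
      (List.dropWhile PySem.Chars.isspace
        ((List.dropWhile PySem.Chars.isspace m).reverse)).reverse := fun m => rfl
  have hpred : (PySem.Chars.isspace ∘ PySem.Chars.lowerChar) = PySem.Chars.isspace :=
    funext fun c => isspace_lowerChar c
  rw [hl, hs, hs, hl, List.dropWhile_map, hpred, ← List.map_reverse, List.dropWhile_map, hpred,
    List.map_reverse]

theorem go_nil (cur : List Char) :
    PySem.Chars.split₀.go [] cur [] = if cur.isEmpty then [] else [cur.reverse] := by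
  rw [PySem.Chars.split₀.go]
  by_cases h : cur.isEmpty = true <;> simp [h]

-- split₀ over a space boundary splits
theorem go_append_space (y : List Char) : ∀ (x cur : List Char),
    PySem.Chars.split₀.go (x ++ ' ' :: y) cur [] =
      PySem.Chars.split₀.go x cur [] ++ PySem.Chars.split₀.go y [] [] := by
  intro x
  induction x with
  | nil =>
    intro cur
    rw [List.nil_append]
    conv_lhs => rw [PySem.Chars.split₀.go]
    rw [go_nil]
    have hsp : PySem.Chars.isspace ' ' = true := by decide
    by_cases h : cur.isEmpty = true
    · simp [hsp, h]
    · simp only [hsp, h, if_true, Bool.false_eq_true, if_false]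
      rw [go_acc]
      simp
  | cons c t ih =>
    intro cur
    rw [List.cons_append, PySem.Chars.split₀.go]
    conv_rhs => rw [PySem.Chars.split₀.go]
    by_cases hs : PySem.Chars.isspace c = true
    · by_cases he : cur.isEmpty = true
      · simp only [hs, he, if_true]
        exact ih []
      · simp only [hs, he, if_true, Bool.false_eq_true, if_false]
        rw [go_acc t, go_acc (t ++ ' ' :: y), ih []]
        simp
    · simp only [hs, Bool.false_eq_true, if_false]
      exact ih (c :: cur)

theorem split_append_space (x y : List Char) :
    PySem.Chars.split₀ (x ++ ' ' :: y) = PySem.Chars.split₀ x ++ PySem.Chars.split₀ y :=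
  go_append_space y x []

-- leading whitespace is invisible to B's pipeline (on already-mapped input)
theorem split_Fm_dropWhile (M : List Char) :
    PySem.Chars.split₀ (Fm (List.dropWhile PySem.Chars.isspace M)) =
      PySem.Chars.split₀ (Fm M) := by
  induction M with
  | nil => rfl
  | cons c r ih =>
    by_cases hs : PySem.Chars.isspace c = true
    · rw [List.dropWhile_cons_of_pos hs, ih]
      have hF : Fm (c :: r) = pvMapB c ++ Fm r := by simp [Fm]
      by_cases hsp : c = ' '
      · subst hsp
        rw [hF, map_space, show ([' '] ++ Fm r) = [] ++ ' ' :: Fm r from rfl,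
          split_append_space]
        rfl
      · rw [hF, ws_map_empty c hs hsp, List.nil_append]
    · rw [List.dropWhile_cons_of_neg (by simp [hs])]

-- trailing whitespace is invisible too
theorem split_Fm_append_ws (w : List Char) (hw : ∀ c ∈ w, PySem.Chars.isspace c = true) :
    ∀ m : List Char, PySem.Chars.split₀ (Fm (m ++ w)) = PySem.Chars.split₀ (Fm m) := by
  induction w with
  | nil => intro m; simp
  | cons c w' ih =>
    intro m
    rw [show m ++ c :: w' = (m ++ [c]) ++ w' from by simp,
      ih (fun d hd => hw d (List.mem_cons_of_mem c hd)) (m ++ [c])]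
    have hc : PySem.Chars.isspace c = true := hw c List.mem_cons_self
    have hF : Fm (m ++ [c]) = Fm m ++ pvMapB c := by simp [Fm]
    by_cases hsp : c = ' '
    · subst hsp
      rw [hF, map_space, show Fm m ++ [' '] = Fm m ++ ' ' :: [] from rfl, split_append_space]
      simp [PySem.Chars.split₀]
      rw [PySem.Chars.split₀.go]
      simp
    · rw [hF, ws_map_empty c hc hsp, List.append_nil]

-- strip is invisible to B's pipeline
theorem split_Fm_strip (M : List Char) :
    PySem.Chars.split₀ (Fm (PySem.Chars.strip M)) = PySem.Chars.split₀ (Fm M) := by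
  have hs : PySem.Chars.strip M =
      (List.dropWhile PySem.Chars.isspace
        ((List.dropWhile PySem.Chars.isspace M).reverse)).reverse := rfl
  set d := List.dropWhile PySem.Chars.isspace M with hd
  have hdec : d = (List.dropWhile PySem.Chars.isspace d.reverse).reverse ++
      (List.takeWhile PySem.Chars.isspace d.reverse).reverse := by
    conv_lhs => rw [← List.reverse_reverse d,
      ← List.takeWhile_append_dropWhile (p := PySem.Chars.isspace) (l := d.reverse)]
    rw [List.reverse_append]
  have hws : ∀ c ∈ (List.takeWhile PySem.Chars.isspace d.reverse).reverse,
      PySem.Chars.isspace c = true := by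
    intro c hc
    exact List.mem_takeWhile_imp (List.mem_reverse.mp hc)
  calc PySem.Chars.split₀ (Fm (PySem.Chars.strip M))
      = PySem.Chars.split₀ (Fm ((List.dropWhile PySem.Chars.isspace d.reverse).reverse)) := by
        rw [hs]
    _ = PySem.Chars.split₀ (Fm d) := by
        conv_rhs => rw [hdec]
        rw [split_Fm_append_ws _ hws]
    _ = PySem.Chars.split₀ (Fm M) := split_Fm_dropWhile M

-- A's normalize_machine_key equals B's pipeline NB
theorem normA_eq_NB (s : String) :
    normalize_machine_key_A (some s) =
      if (NB s.toList).isEmpty then none else some (NB s.toList) := by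
  rw [normalize_machine_key_A, normalize_text_A]
  have hkeyN : ∀ l : List Char, PySem.Chars.split₀ (Fm (PySem.Chars.lower (PySem.Chars.strip l))) =
      PySem.Chars.split₀ (Fm (PySem.Chars.lower l)) := by
    intro l
    rw [lower_strip, split_Fm_strip]
  by_cases he : (PySem.Chars.strip s.toList).isEmpty = true
  · simp only [he, if_true]
    have h0 : PySem.Chars.strip s.toList = [] := List.isEmpty_iff.mp he
    have : NB s.toList = [] := by
      rw [NB, ← hkeyN, h0]
      rfl
    simp [this]
  · simp only [he, Bool.false_eq_true, if_false]
    have hkey :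
        PySem.Chars.stripChars
          ((PySem.Chars.lower (PySem.Chars.strip s.toList)).foldl machineStepA ([], false)).1 ['-'] =
        NB s.toList := by
      rw [show ((PySem.Chars.lower (PySem.Chars.strip s.toList)).foldl machineStepA ([], false)).1 =
          A1 (PySem.Chars.lower (PySem.Chars.strip s.toList)) false from by
        rw [foldA_acc]; simp]
      rw [show ∀ x : List Char, PySem.Chars.stripChars x ['-'] = rD (List.dropWhile pdD x)
          from fun x => rfl]
      rw [A1_false_lstrip, (main_corr (PySem.Chars.lower (PySem.Chars.strip s.toList))).1]
      rw [NB, ← hkeyN s.toList]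
      rfl
    simp only [hkey]

-- tokens of B's split are nonempty, so the join is empty iff the token list is
theorem join_split_eq_nil_iff (m : List Char) :
    PySem.Chars.join ['-'] (PySem.Chars.split₀ m) = [] ↔ PySem.Chars.split₀ m = [] := by
  constructor
  · intro h
    by_contra hne
    exact join_ne_nil _ (go_ne_nil m []) hne h
  · intro h
    rw [h]; rfl

-- A's guarded project slot expressed through B's pipeline NB
theorem proj_part (project_key : Option String) :
    (match project_key with
      | none => none
      | some s => if !s.toList.isEmpty && s != "unassigned"
          then normalize_machine_key_A (some s) else none) =
      (if (NB ((match project_key with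
          | none => ""
          | some s => if s.toList.isEmpty || s == "unassigned" then "" else s : String)).toList).isEmpty
        then none
        else some (NB ((match project_key with
          | none => ""
          | some s => if s.toList.isEmpty || s == "unassigned" then "" else s : String)).toList)) := by
  cases project_key with
  | none => rfl
  | some s =>
    by_cases hc : (s.toList.isEmpty || s == "unassigned") = true
    · have hb : (!s.toList.isEmpty && s != "unassigned") = false := by
        simp only [bne, Bool.or_eq_true] at *
        rcases hc with h | h <;> simp [h]
      simp only [hb, Bool.false_eq_true, if_false, hc, if_true]
      rfl
    · have hb : (!s.toList.isEmpty && s != "unassigned") = true := by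
        simp only [Bool.or_eq_true, not_or] at hc
        simp [bne, Bool.eq_false_iff.mpr hc.1, Bool.eq_false_iff.mpr hc.2]
      simp only [hb, if_true, hc, Bool.false_eq_true, if_false]
      exact normA_eq_NB s

theorem derive_eq (project_key : Option String) (category : Option String) (title : String) :
    derive_page_key_py project_key category title = derive_page_key_py_alt project_key category title := by
  simp only [derive_page_key_py, derive_page_key_py_alt]
  rw [proj_part project_key]
  generalize ((match project_key with
    | none => ""
    | some s => if s.toList.isEmpty || s == "unassigned" then "" else s : String)) = pk
  have hcombined : PySem.Chars.join [' '] [pk.toList, (category.getD "").toList, title.toList] =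
      pk.toList ++ ' ' :: ((category.getD "").toList ++ ' ' :: title.toList) := by
    rw [join_cons, join_cons, join_cons]
    simp
  rw [hcombined]
  have hlow : ∀ a b : List Char, PySem.Chars.lower (a ++ ' ' :: b) =
      PySem.Chars.lower a ++ ' ' :: PySem.Chars.lower b := by
    intro a b
    show (a ++ ' ' :: b).map PySem.Chars.lowerChar =
      a.map PySem.Chars.lowerChar ++ ' ' :: b.map PySem.Chars.lowerChar
    simp [show PySem.Chars.lowerChar ' ' = ' ' from rfl]
  have hFm : ∀ a b : List Char, Fm (a ++ ' ' :: b) = Fm a ++ ' ' :: Fm b := by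
    intro a b
    simp [Fm, map_space]
  -- B's token list is the concatenation of the three per-part token lists
  set S1 := PySem.Chars.split₀ (Fm (PySem.Chars.lower pk.toList)) with hS1
  set S2 := PySem.Chars.split₀ (Fm (PySem.Chars.lower (category.getD "").toList)) with hS2
  set S3 := PySem.Chars.split₀ (Fm (PySem.Chars.lower title.toList)) with hS3
  have hsplit : PySem.Chars.split₀
      ((PySem.Chars.lower (pk.toList ++ ' ' :: ((category.getD "").toList ++ ' ' :: title.toList))).flatMap pvMapB) =
      S1 ++ (S2 ++ S3) := by
    rw [show ∀ m : List Char, m.flatMap pvMapB = Fm m from fun m => rfl]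
    rw [hlow, hFm, hlow, hFm, split_append_space, split_append_space]
  rw [hsplit]
  -- A's remaining two optional parts in terms of NB
  have h2 : normalize_machine_key_A category =
      (if (NB (category.getD "").toList).isEmpty then none else some (NB (category.getD "").toList)) := by
    cases category with
    | none => rfl
    | some c => exact normA_eq_NB c
  have h3 := normA_eq_NB title
  rw [h2, h3]
  -- now both sides are expressed through NB / Si; relate them
  have hN1 : NB pk.toList = PySem.Chars.join ['-'] S1 := rfl
  have hN2 : NB (category.getD "").toList = PySem.Chars.join ['-'] S2 := rfl
  have hN3 : NB title.toList = PySem.Chars.join ['-'] S3 := rfl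
  rw [hN1, hN2, hN3]
  have e1 := join_split_eq_nil_iff (Fm (PySem.Chars.lower pk.toList))
  have e2 := join_split_eq_nil_iff (Fm (PySem.Chars.lower (category.getD "").toList))
  have e3 := join_split_eq_nil_iff (Fm (PySem.Chars.lower title.toList))
  rw [← hS1] at e1; rw [← hS2] at e2; rw [← hS3] at e3
  rw [join_append, join_append]
  by_cases c1 : S1 = [] <;> by_cases c2 : S2 = [] <;> by_cases c3 : S3 = [] <;>
    simp_all [List.isEmpty_iff, List.filterMap, join_cons, List.append_eq_nil_iff]

-- ===== VERDICT (by name: the statement is the Claim_ definition above) =====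
theorem derive_page_key_py_spec : Claim_equal_derive_page_key_py := by
  intro pk cat title _
  show derive_page_key_py pk cat title = derive_page_key_py_alt pk cat title
  exact derive_eq pk cat title
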